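-- pv_equiv track=rewrite | github.com/Seungju182/Hackerrank | algorithms/queens-attack-2.py | queensAttack
-- ===== SOURCE A (Python) =====
-- def queensAttack(n, k, r_q, c_q, obstacles):
--     # Write your code here
--     obstacles = set(map(tuple, obstacles))
--     directions = [
--         [1, 0],
--         [1, 1],
--         [1, -1],
--         [0, 1],
--         [0, -1],
--         [-1, 1],
--         [-1, 0],
--         [-1, -1]
--     ]
--     num_route = 0
--     for go_to in directions:
--         r = r_q + go_to[0]
--         c = c_q + go_to[1]
--         while r in range(1, n+1) and c in range(1, n+1):
--             if (r, c) in obstacles: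
--                 break
--             num_route += 1
--             r += go_to[0]
--             c += go_to[1]
--     return num_route
-- ===== SOURCE B (Python) =====
-- DIRECTIONS = ((1, 0), (1, 1), (1, -1), (0, 1), (0, -1), (-1, 1), (-1, 0), (-1, -1))
--
--
-- def queensAttack(n, k, r_q, c_q, obstacles):
--     total = 0
--     for a, b in DIRECTIONS:
--         # squares reachable in this direction before leaving the board,
--         # computed in O(1) from the distance to the nearest edge
--         if not (1 <= r_q + a <= n and 1 <= c_q + b <= n):
--             continue
--         hi = n
--         if a == 1:
--             hi = min(hi, n - r_q)
--         if a == -1: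
--             hi = min(hi, r_q - 1)
--         if b == 1:
--             hi = min(hi, n - c_q)
--         if b == -1:
--             hi = min(hi, c_q - 1)
--         cnt = hi
--         # one scan of the obstacles: the nearest obstacle on this ray caps cnt
--         for o in obstacles:
--             if len(o) == 2:
--                 x, y = o
--                 dr = x - r_q
--                 dc = y - c_q
--                 t = max(abs(dr), abs(dc))
--                 if t >= 1 and dr == a * t and dc == b * t:
--                     cnt = min(cnt, t - 1)
--         total += cnt
--     return total
-- ===== Notes on version B (the rewrite author's own statement) =====
-- stated objective: faster
-- what changed: A walks every square of each of the 8 rays one step at a time until it hits the edge or an obstacle; B computes the distance to the edge per ray with an O(1) arithmetic formula and caps it by the nearest obstacle found in a single scan of the obstacle list, removing the O(n) walk entirely.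
import Mathlib
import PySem

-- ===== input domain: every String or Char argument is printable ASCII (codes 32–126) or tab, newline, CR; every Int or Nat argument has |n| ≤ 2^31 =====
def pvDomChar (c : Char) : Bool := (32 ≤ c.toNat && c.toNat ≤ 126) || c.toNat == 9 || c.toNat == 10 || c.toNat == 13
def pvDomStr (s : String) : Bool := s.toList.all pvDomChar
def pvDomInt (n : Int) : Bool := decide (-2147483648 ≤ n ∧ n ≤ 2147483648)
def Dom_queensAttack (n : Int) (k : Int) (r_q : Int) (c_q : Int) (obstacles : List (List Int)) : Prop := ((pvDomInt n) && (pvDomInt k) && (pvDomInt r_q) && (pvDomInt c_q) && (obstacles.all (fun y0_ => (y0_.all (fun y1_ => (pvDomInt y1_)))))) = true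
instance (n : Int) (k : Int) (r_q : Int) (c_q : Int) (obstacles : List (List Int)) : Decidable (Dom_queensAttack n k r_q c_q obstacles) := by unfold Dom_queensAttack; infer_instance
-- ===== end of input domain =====

-- B replaces A's per-square walk along each of the 8 rays (O(n) per ray) by an O(1)
-- distance-to-edge formula per ray capped by one scan of the obstacle list: O(n+k) → O(k).

-- ===== PORT A =====
-- A's inner while loop; Python tuples of the obstacle set are ported as the underlying
-- lists (tuple equality = list equality, so membership is identical). The loop runs at
-- most n times (each iteration moves one step along a ray inside the 1..n board), so
-- fuel n.toNat + 1 never runs out; `r in range(1, n+1)` is 1 ≤ r < n+1.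
def pyWalkA (n : Int) (obsSet : List (List Int)) (a b : Int) (r c : Int) (fuel : Nat) (acc : Int) : Int :=
  match fuel with
  | 0 => acc
  | fuel + 1 =>
    if (1 ≤ r ∧ r < n + 1) ∧ (1 ≤ c ∧ c < n + 1) then
      if [r, c] ∈ obsSet then acc
      else pyWalkA n obsSet a b (r + a) (c + b) fuel (acc + 1)
    else acc

def queensAttack (n : Int) (k : Int) (r_q : Int) (c_q : Int) (obstacles : List (List Int)) : Int :=
  let obsSet := PySem.Set.ofList obstacles
  let directions : List (Int × Int) := [(1, 0), (1, 1), (1, -1), (0, 1), (0, -1), (-1, 1), (-1, 0), (-1, -1)]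
  directions.foldl
    (fun num_route d =>
      pyWalkA n obsSet d.1 d.2 (r_q + d.1) (c_q + d.2) (n.toNat + 1) num_route)
    0

-- ===== PORT B =====
-- Source B's obstacle scan step: obstacles of length ≠ 2 are skipped (they can never match).
def obsCap (r_q c_q a b : Int) (cnt : Int) (o : List Int) : Int :=
  match o with
  | [x, y] =>
    let dr := x - r_q
    let dc := y - c_q
    let t := max |dr| |dc|
    if 1 ≤ t ∧ dr = a * t ∧ dc = b * t then min cnt (t - 1) else cnt
  | _ => cnt

-- Source B's if-chain computing the distance to the board edge in direction (a, b)
def hiOf (n r_q c_q a b : Int) : Int :=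
  let hi0 := n
  let hi1 := if a = 1 then min hi0 (n - r_q) else hi0
  let hi2 := if a = -1 then min hi1 (r_q - 1) else hi1
  let hi3 := if b = 1 then min hi2 (n - c_q) else hi2
  if b = -1 then min hi3 (c_q - 1) else hi3

def dirCnt (n r_q c_q : Int) (obstacles : List (List Int)) (a b : Int) : Int :=
  if 1 ≤ r_q + a ∧ r_q + a ≤ n ∧ 1 ≤ c_q + b ∧ c_q + b ≤ n then
    obstacles.foldl (obsCap r_q c_q a b) (hiOf n r_q c_q a b)
  else 0

def queensAttack_alt (n : Int) (k : Int) (r_q : Int) (c_q : Int) (obstacles : List (List Int)) : Int :=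
  ([(1, 0), (1, 1), (1, -1), (0, 1), (0, -1), (-1, 1), (-1, 0), (-1, -1)] : List (Int × Int)).foldl
    (fun total d => total + dirCnt n r_q c_q obstacles d.1 d.2) 0

-- ===== PRECONDITION & SPEC =====
def Spec_queensAttack (n : Int) (k : Int) (r_q : Int) (c_q : Int) (obstacles : List (List Int)) (out : Int) : Prop := out = queensAttack_alt n k r_q c_q obstacles
instance (n : Int) (k : Int) (r_q : Int) (c_q : Int) (obstacles : List (List Int)) (out : Int) : Decidable (Spec_queensAttack n k r_q c_q obstacles out) := by unfold Spec_queensAttack; infer_instance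

-- ===== CLAIM (what is proved, stated in full; the proofs are below) =====
def Claim_equal_queensAttack : Prop := ∀ (n : Int) (k : Int) (r_q : Int) (c_q : Int) (obstacles : List (List Int)), Dom_queensAttack n k r_q c_q obstacles → Spec_queensAttack n k r_q c_q obstacles (queensAttack n k r_q c_q obstacles)

-- ===== LEMMAS AND PROOFS =====


-- "square t steps from the queen along (a,b) is on the board and free of obstacles"
def goodSq (n : Int) (obsSet : List (List Int)) (r_q c_q a b : Int) (t : Int) : Prop :=
  ((1 ≤ r_q + a * t ∧ r_q + a * t < n + 1) ∧ (1 ≤ c_q + b * t ∧ c_q + b * t < n + 1)) ∧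
    [r_q + a * t, c_q + b * t] ∉ obsSet

def isDir (a b : Int) : Prop :=
  (a, b) = ((1 : Int), (0 : Int)) ∨ (a, b) = ((1 : Int), (1 : Int)) ∨ (a, b) = ((1 : Int), (-1 : Int)) ∨
  (a, b) = ((0 : Int), (1 : Int)) ∨ (a, b) = ((0 : Int), (-1 : Int)) ∨ (a, b) = ((-1 : Int), (1 : Int)) ∨
  (a, b) = ((-1 : Int), (0 : Int)) ∨ (a, b) = ((-1 : Int), (-1 : Int))


theorem walk_acc (n : Int) (s : List (List Int)) (a b : Int) :
    ∀ (fuel : Nat) (r c acc : Int),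
      pyWalkA n s a b r c fuel acc = acc + pyWalkA n s a b r c fuel 0 := by
  intro fuel
  induction fuel with
  | zero => intro r c acc; simp [pyWalkA]
  | succ f ih =>
    intro r c acc
    simp only [pyWalkA]
    split_ifs with h1 h2
    · simp
    · rw [ih _ _ (acc + 1), ih _ _ ((0 : Int) + 1)]; omega
    · simp

theorem obsCap_le (r_q c_q a b cnt : Int) (o : List Int) :
    obsCap r_q c_q a b cnt o ≤ cnt := by
  unfold obsCap
  rcases o with _ | ⟨x, _ | ⟨y, _ | _⟩⟩ <;> simp <;> split_ifs <;> simp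

theorem fold_le (r_q c_q a b : Int) :
    ∀ (l : List (List Int)) (v : Int), l.foldl (obsCap r_q c_q a b) v ≤ v := by
  intro l
  induction l with
  | nil => intro v; simp
  | cons o rest ih =>
    intro v
    calc rest.foldl (obsCap r_q c_q a b) (obsCap r_q c_q a b v o) ≤ obsCap r_q c_q a b v o := ih _
    _ ≤ v := obsCap_le _ _ _ _ _ _

theorem obsCap_hit (r_q c_q a b cnt t : Int)
    (hab : |a| ≤ 1 ∧ |b| ≤ 1 ∧ (|a| = 1 ∨ |b| = 1)) (ht : 1 ≤ t) :
    obsCap r_q c_q a b cnt [r_q + a * t, c_q + b * t] = min cnt (t - 1) := by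
  unfold obsCap
  simp only []
  have hdr : r_q + a * t - r_q = a * t := by ring
  have hdc : c_q + b * t - c_q = b * t := by ring
  rw [hdr, hdc]
  have hat : |a * t| = |a| * t := by rw [abs_mul, abs_of_nonneg (by omega : (0:Int) ≤ t)]
  have hbt : |b * t| = |b| * t := by rw [abs_mul, abs_of_nonneg (by omega : (0:Int) ≤ t)]
  have hmax : max |a * t| |b * t| = t := by
    rw [hat, hbt]
    rcases hab with ⟨ha, hb, hone⟩
    have ha0 : 0 ≤ |a| := abs_nonneg a
    have hb0 : 0 ≤ |b| := abs_nonneg b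
    rcases hone with h | h <;> rw [h] <;> simp <;> nlinarith
  rw [hmax]
  rw [if_pos ⟨ht, rfl, rfl⟩]







theorem walk_exact (n : Int) (s : List (List Int)) (r_q c_q a b : Int) :
    ∀ (m fuel : Nat) (j : Int), m < fuel →
      (∀ i : Int, j ≤ i → i < j + m → goodSq n s r_q c_q a b i) →
      ¬ goodSq n s r_q c_q a b (j + m) →
      pyWalkA n s a b (r_q + a * j) (c_q + b * j) fuel 0 = m := by
  intro m
  induction m with
  | zero =>
    intro fuel j hf _ hstop
    obtain ⟨f, rfl⟩ : ∃ f, fuel = f + 1 := ⟨fuel - 1, by omega⟩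
    simp only [pyWalkA]
    unfold goodSq at hstop
    simp only [Nat.cast_zero, add_zero] at hstop
    split_ifs with h1 h2
    · rfl
    · exact absurd ⟨h1, h2⟩ hstop
    · rfl
  | succ m ih =>
    intro fuel j hf hgood hstop
    obtain ⟨f, rfl⟩ : ∃ f, fuel = f + 1 := ⟨fuel - 1, by omega⟩
    have hj : goodSq n s r_q c_q a b j := hgood j le_rfl (by omega)
    unfold goodSq at hj
    simp only [pyWalkA]
    rw [if_pos hj.1, if_neg (by simpa using hj.2)]
    have hstep1 : r_q + a * j + a = r_q + a * (j + 1) := by ring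
    have hstep2 : c_q + b * j + b = c_q + b * (j + 1) := by ring
    rw [hstep1, hstep2, walk_acc]
    have hrec : pyWalkA n s a b (r_q + a * (j + 1)) (c_q + b * (j + 1)) f 0 = m := by
      apply ih f (j + 1) (by omega)
      · intro i hi1 hi2
        exact hgood i (by omega) (by push_cast; push_cast at hi2; omega)
      · have harg : j + 1 + (m : Int) = j + ((m + 1 : Nat) : Int) := by push_cast; ring
        rw [harg]
        exact hstop
    rw [hrec]
    push_cast
    ring

theorem fold_hit_le (r_q c_q a b : Int)
    (hab : |a| ≤ 1 ∧ |b| ≤ 1 ∧ (|a| = 1 ∨ |b| = 1)) :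
    ∀ (l : List (List Int)) (v t : Int), 1 ≤ t →
      [r_q + a * t, c_q + b * t] ∈ l →
      l.foldl (obsCap r_q c_q a b) v ≤ t - 1 := by
  intro l
  induction l with
  | nil => intro v t _ hm; simp at hm
  | cons o rest ih =>
    intro v t ht hm
    rcases List.mem_cons.mp hm with heq | hm'
    · subst heq
      simp only [List.foldl_cons]
      calc rest.foldl (obsCap r_q c_q a b) (obsCap r_q c_q a b v [r_q + a * t, c_q + b * t])
          ≤ obsCap r_q c_q a b v [r_q + a * t, c_q + b * t] := fold_le _ _ _ _ _ _
        _ ≤ t - 1 := by rw [obsCap_hit r_q c_q a b v t hab ht]; exact min_le_right _ _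
    · exact ih _ t ht hm'

theorem fold_attained (r_q c_q a b : Int) :
    ∀ (l : List (List Int)) (v : Int),
      l.foldl (obsCap r_q c_q a b) v = v ∨
      ∃ t : Int, 1 ≤ t ∧ [r_q + a * t, c_q + b * t] ∈ l ∧
        l.foldl (obsCap r_q c_q a b) v = t - 1 := by
  intro l
  induction l with
  | nil => intro v; left; rfl
  | cons o rest ih =>
    intro v
    simp only [List.foldl_cons]
    have hstep : obsCap r_q c_q a b v o = v ∨
        ∃ t : Int, 1 ≤ t ∧ o = [r_q + a * t, c_q + b * t] ∧
          obsCap r_q c_q a b v o = min v (t - 1) := by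
      unfold obsCap
      rcases o with _ | ⟨x, _ | ⟨y, _ | z⟩⟩
      · left; rfl
      · left; rfl
      · simp only []
        split_ifs with h
        · right
          refine ⟨max |x - r_q| |y - c_q|, h.1, ?_, rfl⟩
          have : x = r_q + a * max |x - r_q| |y - c_q| := by omega
          have : y = c_q + b * max |x - r_q| |y - c_q| := by omega
          simp only [List.cons.injEq, and_true]
          constructor <;> omega
        · left; rfl
      · left; rfl
    rcases hstep with h0 | ⟨t, ht, ho, hv⟩
    · rw [h0]
      rcases ih v with h | ⟨t, ht, hm, he⟩
      · left; exact h
      · right; exact ⟨t, ht, List.mem_cons_of_mem _ hm, he⟩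
    · rw [hv]
      rcases ih (min v (t - 1)) with h | ⟨t', ht', hm, he⟩
      · by_cases hle : v ≤ t - 1
        · left; rw [h, min_eq_left hle]
        · right
          refine ⟨t, ht, ?_, ?_⟩
          · rw [ho] at *; exact List.mem_cons_self
          · rw [h, min_eq_right (by omega)]
      · right; exact ⟨t', ht', List.mem_cons_of_mem _ hm, he⟩

theorem hi_spec (n r_q c_q a b : Int) (hdir : isDir a b)
    (hstart : 1 ≤ r_q + a ∧ r_q + a ≤ n ∧ 1 ≤ c_q + b ∧ c_q + b ≤ n) :
    (∀ t : Int, 1 ≤ t →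
      ((1 ≤ r_q + a * t ∧ r_q + a * t < n + 1) ∧ (1 ≤ c_q + b * t ∧ c_q + b * t < n + 1)
        ↔ t ≤ hiOf n r_q c_q a b)) ∧
    1 ≤ hiOf n r_q c_q a b ∧ hiOf n r_q c_q a b ≤ n := by
  rcases hdir with h | h | h | h | h | h | h | h <;>
    (simp only [Prod.mk.injEq] at h; obtain ⟨rfl, rfl⟩ := h;
     refine ⟨fun t ht => ?_, ?_, ?_⟩ <;> simp only [hiOf] <;> norm_num <;> omega)

theorem dir_eq (n r_q c_q : Int) (obstacles : List (List Int)) (a b : Int)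
    (hdir : isDir a b) :
    pyWalkA n (PySem.Set.ofList obstacles) a b (r_q + a) (c_q + b) (n.toNat + 1) 0
      = dirCnt n r_q c_q obstacles a b := by
  have hab : |a| ≤ 1 ∧ |b| ≤ 1 ∧ (|a| = 1 ∨ |b| = 1) := by
    rcases hdir with h | h | h | h | h | h | h | h <;>
      (simp only [Prod.mk.injEq] at h; obtain ⟨rfl, rfl⟩ := h; norm_num)
  by_cases hstart : 1 ≤ r_q + a ∧ r_q + a ≤ n ∧ 1 ≤ c_q + b ∧ c_q + b ≤ n
  · obtain ⟨hiff, hi1, hin⟩ := hi_spec n r_q c_q a b hdir hstart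
    have hEhi : obstacles.foldl (obsCap r_q c_q a b) (hiOf n r_q c_q a b) ≤ hiOf n r_q c_q a b :=
      fold_le r_q c_q a b obstacles _
    have hE0 : 0 ≤ obstacles.foldl (obsCap r_q c_q a b) (hiOf n r_q c_q a b) := by
      rcases fold_attained r_q c_q a b obstacles (hiOf n r_q c_q a b) with h | ⟨t, ht, _, he⟩ <;> omega
    have hmE : ((obstacles.foldl (obsCap r_q c_q a b) (hiOf n r_q c_q a b)).toNat : Int)
        = obstacles.foldl (obsCap r_q c_q a b) (hiOf n r_q c_q a b) := Int.toNat_of_nonneg hE0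
    have hw : pyWalkA n (PySem.Set.ofList obstacles) a b (r_q + a * 1) (c_q + b * 1) (n.toNat + 1) 0
        = (((obstacles.foldl (obsCap r_q c_q a b) (hiOf n r_q c_q a b)).toNat : Nat) : Int) := by
      apply walk_exact
      · omega
      · intro i h1 h2
        constructor
        · exact (hiff i (by omega)).mpr (by omega)
        · intro hmem
          rw [PySem.Set.mem_ofList] at hmem
          have := fold_hit_le r_q c_q a b hab obstacles (hiOf n r_q c_q a b) i (by omega) hmem
          omega
      · intro hg
        rcases fold_attained r_q c_q a b obstacles (hiOf n r_q c_q a b) with hEeq | ⟨t, ht, hmem, hEeq⟩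
        · have := (hiff _ (by omega)).mp hg.1
          omega
        · apply hg.2
          rw [PySem.Set.mem_ofList]
          have harg : (1 : Int) + ((obstacles.foldl (obsCap r_q c_q a b) (hiOf n r_q c_q a b)).toNat : Int) = t := by omega
          rw [harg]
          exact hmem
    rw [dirCnt, if_pos hstart]
    rw [show r_q + a * 1 = r_q + a from by ring, show c_q + b * 1 = c_q + b from by ring] at hw
    rw [hw, hmE]
  · rw [dirCnt, if_neg hstart]
    have hw : pyWalkA n (PySem.Set.ofList obstacles) a b (r_q + a * 1) (c_q + b * 1) (n.toNat + 1) 0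
        = ((0 : Nat) : Int) := by
      apply walk_exact
      · omega
      · intro i h1 h2; omega
      · intro hg
        have hb := hg.1
        simp only [Nat.cast_zero, add_zero, mul_one] at hb
        exact hstart ⟨by omega, by omega, by omega, by omega⟩
    rw [show r_q + a * 1 = r_q + a from by ring, show c_q + b * 1 = c_q + b from by ring] at hw
    simpa using hw

theorem fold_eq (n r_q c_q : Int) (obstacles : List (List Int)) :
    ∀ (ds : List (Int × Int)), (∀ d ∈ ds, isDir d.1 d.2) → ∀ acc : Int,
      ds.foldl (fun num_route d =>
          pyWalkA n (PySem.Set.ofList obstacles) d.1 d.2 (r_q + d.1) (c_q + d.2) (n.toNat + 1) num_route) acc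
      = ds.foldl (fun total d => total + dirCnt n r_q c_q obstacles d.1 d.2) acc := by
  intro ds
  induction ds with
  | nil => intro _ acc; rfl
  | cons d rest ih =>
    intro hds acc
    rw [List.foldl_cons, List.foldl_cons]
    rw [walk_acc, dir_eq n r_q c_q obstacles d.1 d.2 (hds d List.mem_cons_self)]
    exact ih (fun d' hd' => hds d' (List.mem_cons_of_mem _ hd')) _

-- ===== VERDICT (by name: the statement is the Claim_ definition above) =====
theorem queensAttack_spec : Claim_equal_queensAttack := by
  intro n k r_q c_q obstacles _
  unfold Spec_queensAttack queensAttack queensAttack_alt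
  refine fold_eq n r_q c_q obstacles _ ?_ 0
  intro d hd
  unfold isDir
  fin_cases hd <;> simp
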